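-- pv_equiv track=rewrite | github.com/FRANCHI-Charles/MIDI-pattern-detection | mathyslib/sotaalgo.py | SIA
-- ===== SOURCE A (Python) =====
-- from collections import defaultdict
--
-- def _compute_vector_table(X):
--     vectors = []
--     for i in range(len(X)):
--         for j in range(i + 1, len(X)):
--             vector = (X[j][0] - X[i][0], X[j][1] - X[i][1])
--             vectors.append((vector, i))  # (vector, index of origin)
--     return vectors
--
-- def SIA(X):
--     """
--     Applies the SIA (Structure Induction Algorithm) to a 2D point set X.
--     Returns a list of maximal translatable patterns (MTPs), each as a tuple:
--     (pattern, vector), where: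
--       - pattern is a list of points
--       - vector is the common translation
--     """
--     # Step 1 – Sorting the dataset
--     X = sorted(X)
--
--     # Step 2 – Computing the vector table
--     V = _compute_vector_table(X)
--
--     # Step 3 – Sorting the vectors
--     V_sorted = sorted(V, key=lambda vi: (vi[0], vi[1]))
--
--     # Step 4 – Printing out (i.e., building the structure of SD(X))
--     mtp_dict = defaultdict(list)
--     for vector, i in V_sorted:
--         mtp_dict[vector].append(i)
--
--     SD = []
--
--     for vector, indices in mtp_dict.items():
--         if len(indices) >= 2:
--             # Build the pattern = each origin point + the vector
--             pattern = [X[i] for i in indices]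
--             # Append as (pattern, translation_vector)
--             SD.append((pattern, vector))
--
--     return SD
-- ===== SOURCE B (Python) =====
-- def SIA(X):
--     """
--     Applies the SIA (Structure Induction Algorithm) to a 2D point set X.
--     Returns a list of maximal translatable patterns (MTPs), each as a tuple
--     (pattern, vector).  Instead of grouping origin indices by difference
--     vector, the pattern of each distinct vector v is rebuilt directly as the
--     points p whose translate p+v is again in the point set (a hashed
--     membership test): for a duplicate-free X and a vector v realised by some
--     ordered pair of the sorted list, p+v lies in X exactly when p is an
--     origin of v.
--     """
--     Xs = sorted(X)
--     S = set(Xs)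
--     vecs = sorted({(q[0] - p[0], q[1] - p[1])
--                    for k, p in enumerate(Xs) for q in Xs[k + 1:]})
--     SD = []
--     for v in vecs:
--         pattern = [p for p in Xs if (p[0] + v[0], p[1] + v[1]) in S]
--         if len(pattern) >= 2:
--             SD.append((pattern, v))
--     return SD
-- ===== Notes on version B (the rewrite author's own statement) =====
-- stated objective: alternative
-- what changed: B never groups origin indices by vector: it collects the distinct difference vectors into a set and rebuilds each vector's pattern directly by a hashed membership test (points p with p+v in set(X)), replacing A's sort of all O(n^2) (vector,index) pairs and dict grouping.
-- outside the precondition, e.g. on SIA([(0, 0), (0, 0)]): A returns [], B returns [([(0, 0), (0, 0)], (0, 0))]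
import Mathlib
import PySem

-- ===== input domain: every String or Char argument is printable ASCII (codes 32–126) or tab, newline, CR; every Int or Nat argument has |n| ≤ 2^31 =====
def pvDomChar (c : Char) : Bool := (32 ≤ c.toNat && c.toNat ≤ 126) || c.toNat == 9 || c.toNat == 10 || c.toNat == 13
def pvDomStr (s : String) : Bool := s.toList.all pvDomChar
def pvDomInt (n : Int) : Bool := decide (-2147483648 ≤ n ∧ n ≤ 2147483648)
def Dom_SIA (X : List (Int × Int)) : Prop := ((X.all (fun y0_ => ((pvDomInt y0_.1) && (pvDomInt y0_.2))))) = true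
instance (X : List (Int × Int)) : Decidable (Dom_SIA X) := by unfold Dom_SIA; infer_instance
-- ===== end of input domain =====

-- B replaces A's sort-all-pairs-then-group-indices-by-vector strategy: it collects only the
-- DISTINCT difference vectors into a set and rebuilds each vector's pattern directly as the
-- points p whose translate p+v lies again in the point set (objective: alternative).

-- ===== PORT A =====
-- _compute_vector_table: nested index loops appending ((dx, dy), i)
def pvVectorTable (X : List (Int × Int)) : List ((Int × Int) × Int) :=
  (PySem.List.pyRange 0 (X.length : Int) 1).foldl (fun vectors i =>
    (PySem.List.pyRange (i + 1) (X.length : Int) 1).foldl (fun vectors j =>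
      let xi := PySem.List.pyGetD X i (0, 0)
      let xj := PySem.List.pyGetD X j (0, 0)
      vectors ++ [((xj.1 - xi.1, xj.2 - xi.2), i)]) vectors) []

def SIA (X : List (Int × Int)) : List ((List (Int × Int)) × (Int × Int)) :=
  let Xs := PySem.List.sorted2 X Prod.fst Prod.snd           -- sorted(X): pairs compare lexicographically
  let V := pvVectorTable Xs
  -- sorted(V, key=lambda vi: (vi[0], vi[1])): the key is a nested int tuple, which Python
  -- compares lexicographically — exactly Mathlib's Lex order used as the sort key here.
  let Vsorted := PySem.List.sorted V (fun vi => toLex (toLex vi.1, vi.2))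
  -- defaultdict(list): mtp_dict[vector].append(i)
  let mtp := Vsorted.foldl (fun d p => d.modify p.1 [] (· ++ [p.2])) PySem.Dict.empty
  mtp.items.foldl (fun sd p =>
    if 2 ≤ p.2.length then sd ++ [(p.2.map (fun i => PySem.List.pyGetD Xs i (0, 0)), p.1)]
    else sd) []

-- ===== PORT B =====
def SIA_alt (X : List (Int × Int)) : List ((List (Int × Int)) × (Int × Int)) :=
  let Xs := PySem.List.sorted2 X Prod.fst Prod.snd           -- sorted(X): pairs compare lexicographically
  let S := PySem.Set.ofList Xs                               -- S = set(Xs)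
  -- {(q0-p0, q1-p1) for k, p in enumerate(Xs) for q in Xs[k+1:]}, then sorted(...)
  let diffs := (PySem.List.enumerate Xs).flatMap (fun kp =>
      (PySem.List.slice Xs (some (kp.1 + 1)) none).map
        (fun q => (q.1 - kp.2.1, q.2 - kp.2.2)))
  let vecs := PySem.List.sorted (PySem.Set.ofList diffs) (fun v => toLex v)
  vecs.foldl (fun sd v =>
      let pattern := Xs.filter (fun p => PySem.Set.contains S (p.1 + v.1, p.2 + v.2))
      if 2 ≤ pattern.length then sd ++ [(pattern, v)] else sd) []

-- ===== PRECONDITION & SPEC =====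
-- Pre_ excludes lists with duplicate points: on a duplicated point the zero difference vector
-- and the per-index multiplicities A's pair grouping produces are accidental for a point-set
-- algorithm, and B's membership-built patterns are an equally defensible reading there.
def Pre_SIA (X : List (Int × Int)) : Prop := X.Nodup
instance (X : List (Int × Int)) : Decidable (Pre_SIA X) := by unfold Pre_SIA; infer_instance
def pvWitness_SIA : (List (Int × Int)) := [(1, 2), (0, 0), (2, 4)]

def Spec_SIA (X : List (Int × Int)) (out : List ((List (Int × Int)) × (Int × Int))) : Prop := out = SIA_alt X
instance (X : List (Int × Int)) (out : List ((List (Int × Int)) × (Int × Int))) : Decidable (Spec_SIA X out) := by unfold Spec_SIA; infer_instance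

-- ===== CLAIM (what is proved, stated in full; the proofs are below) =====
def Claim_equal_SIA : Prop := ∀ (X : List (Int × Int)), Dom_SIA X → Pre_SIA X → Spec_SIA X (SIA X)

-- ===== LEMMAS AND PROOFS =====

-- sorted(X) on int pairs is PySem.List.sorted with the lexicographic (Lex) key
theorem pvSorted2_eq (X : List (Int × Int)) :
    PySem.List.sorted2 X Prod.fst Prod.snd
      = PySem.List.sorted X (fun x => toLex x) := by
  rw [PySem.List.sorted_eq_foldl_insertBy]
  simp only [PySem.List.sorted2]
  congr 1
  funext acc x
  congr 1
  funext a b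
  have : (toLex a < toLex b) ↔ (a.1 < b.1 ∨ (a.1 = b.1 ∧ a.2 < b.2)) := by
    rw [Prod.Lex.lt_iff]; rfl
  by_cases h1 : a.1 < b.1 <;> by_cases h2 : b.1 < a.1 <;> by_cases h3 : a.2 < b.2 <;>
    simp [h1, h2, h3, this] <;> omega

-- the sort key A uses on the vector table: the Python tuple ((dx, dy), i), lexicographically
def pvKey3 (p : (Int × Int) × Int) : Lex ((Lex (Int × Int)) × Int) := toLex (toLex p.1, p.2)

theorem pvKey3_injective : Function.Injective pvKey3 := by
  intro a b h
  simp only [pvKey3] at h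
  have h' := toLex.injective h
  have h1 : toLex a.1 = toLex b.1 := congrArg Prod.fst h'
  have h2 : a.2 = b.2 := congrArg Prod.snd h'
  exact Prod.ext (toLex.injective h1) h2

-- the vector table as a flatMap
theorem pvVectorTable_eq (X : List (Int × Int)) :
    pvVectorTable X = (PySem.List.pyRange 0 (X.length : Int) 1).flatMap (fun i =>
      (PySem.List.pyRange (i + 1) (X.length : Int) 1).map (fun j =>
        (((PySem.List.pyGetD X j (0, 0)).1 - (PySem.List.pyGetD X i (0, 0)).1,
          (PySem.List.pyGetD X j (0, 0)).2 - (PySem.List.pyGetD X i (0, 0)).2), i))) := by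
  simp only [pvVectorTable, PySem.List.foldl_append_eq_flatMap]
  exact List.flatMap_congr (fun i _ => (List.map_eq_flatMap ..).symm)

-- B's vector comprehension (enumerate + slice) generates exactly the first components of A's table
theorem pvDiffs_eq (X : List (Int × Int)) :
    (PySem.List.enumerate X).flatMap (fun kp =>
      (PySem.List.slice X (some (kp.1 + 1)) none).map
        (fun q => (q.1 - kp.2.1, q.2 - kp.2.2)))
      = (pvVectorTable X).map Prod.fst := by
  rw [pvVectorTable_eq, List.map_flatMap, PySem.List.enumerate_eq_map_pyRange X (0, 0),
      List.flatMap_map]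
  refine List.flatMap_congr (fun i hi => ?_)
  have h1 : (0 : Int) ≤ i + 1 := by
    have := (PySem.List.mem_pyRange_one.mp (by simpa using hi)).1
    omega
  rw [PySem.List.slice_from _ h1, List.map_map,
      ← PySem.List.map_pyGetD_pyRange' X (0, 0) h1, List.map_map]
  rfl

-- dedup of a key-nondecreasing list is strictly key-increasing (key injective)
theorem pvOfList_pairwise_lt {α κ : Type} [BEq α] [LawfulBEq α] [LinearOrder κ]
    (key : α → κ) (hinj : Function.Injective key) (l : List α)
    (h : l.Pairwise (fun a b => key a ≤ key b)) :
    (PySem.Set.ofList l).Pairwise (fun a b => key a < key b) := by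
  induction l with
  | nil => simp [PySem.Set.ofList_nil]
  | cons x xs ih =>
    rw [List.pairwise_cons] at h
    rw [PySem.Set.ofList_cons]
    constructor
    · intro y hy
      have hymem : y ∈ PySem.Set.ofList xs := (PySem.Set.mem_discard _ _ _).mp hy |>.1
      have hyne : y ≠ x := (PySem.Set.mem_discard _ _ _).mp hy |>.2
      have := h.1 y ((PySem.Set.mem_ofList _ _).mp hymem)
      exact lt_of_le_of_ne this (fun he => hyne (hinj he.symm))
    · exact List.Pairwise.filter _ (ih h.2)

-- the per-key index groups of the table and of the sorted table agree
theorem pvGroup_eq (W : List ((Int × Int) × Int)) (hW : W.Pairwise (fun a b => a.2 ≤ b.2))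
    (k : Int × Int) :
    ((PySem.List.sorted W pvKey3).filter (fun p => p.1 == k)).map (·.2)
      = (W.filter (fun p => p.1 == k)).map (·.2) := by
  have hperm := (PySem.List.sorted_perm W pvKey3 false).filter (fun p => p.1 == k)
  have h1 : ((PySem.List.sorted W pvKey3).filter (fun p => p.1 == k)).Pairwise
      (fun a b => pvKey3 a ≤ pvKey3 b) :=
    List.Pairwise.filter _ (PySem.List.sorted_pairwise W pvKey3)
  have h2 : (W.filter (fun p => p.1 == k)).Pairwise (fun a b => pvKey3 a ≤ pvKey3 b) := by
    rw [List.pairwise_filter]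
    refine hW.imp_of_mem ?_
    intro a b _ _ hle ha hb
    have ha' : a.1 = k := by simpa using ha
    have hb' : b.1 = k := by simpa using hb
    rw [Prod.Lex.le_iff]
    right
    exact ⟨by simp [pvKey3, ha', hb'], hle⟩
  rw [PySem.List.eq_of_perm_of_pairwise_le_of_injective pvKey3 pvKey3_injective hperm h1 h2]

-- the origin indices in the vector table are non-decreasing
theorem pvVectorTable_pairwise (X : List (Int × Int)) :
    (pvVectorTable X).Pairwise (fun a b => a.2 ≤ b.2) := by
  rw [pvVectorTable_eq, List.pairwise_flatMap]
  constructor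
  · intro a _
    rw [List.pairwise_map]
    exact List.Pairwise.imp (by intro x y _; exact le_refl _) (PySem.List.pairwise_lt_pyRange_one _ _)
  · refine List.Pairwise.imp ?_ (PySem.List.pairwise_lt_pyRange_one _ _)
    intro i₁ i₂ h x hx y hy
    obtain ⟨j₁, -, rfl⟩ := List.mem_map.mp hx
    obtain ⟨j₂, -, rfl⟩ := List.mem_map.mp hy
    exact le_of_lt h

-- the keys of A's dict (first occurrences in the sorted table) are the distinct vectors, sorted
theorem pvKeys_eq (W : List ((Int × Int) × Int)) :
    PySem.List.sorted (PySem.Set.ofList (W.map Prod.fst)) (fun v => toLex v)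
      = PySem.Set.ofList ((PySem.List.sorted W pvKey3).map Prod.fst) := by
  apply PySem.List.sorted_eq_of_perm_of_pairwise_lt
  · rw [List.perm_ext_iff_of_nodup (PySem.Set.nodup_ofList _) (PySem.Set.nodup_ofList _)]
    intro a
    rw [PySem.Set.mem_ofList, PySem.Set.mem_ofList]
    exact ((PySem.List.sorted_perm W pvKey3 false).map Prod.fst).mem_iff
  · apply pvOfList_pairwise_lt (fun v => toLex v) (fun a b h => toLex.injective h)
    rw [List.pairwise_map]
    refine (PySem.List.sorted_pairwise W pvKey3).imp ?_
    intro a b hle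
    rcases Prod.Lex.le_iff.mp hle with h | h
    · exact le_of_lt h
    · exact le_of_eq h.1

-- a filter-then-map written as a flatMap of singletons
theorem pvFilterMap_eq_flatMap {α β : Type} (l : List α) (p : α → Bool) (f : α → β) :
    (l.filter p).map f = l.flatMap (fun x => if p x then [f x] else []) := by
  induction l with
  | nil => rfl
  | cons x xs ih => by_cases h : p x <;> simp [h, ih]

-- translation by a lex-positive vector is lex-increasing
theorem pvLt_add_pos (p k : Int × Int) (hk : 0 < k.1 ∨ (k.1 = 0 ∧ 0 < k.2)) :
    toLex p < toLex (p.1 + k.1, p.2 + k.2) := by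
  obtain ⟨p1, p2⟩ := p
  obtain ⟨k1, k2⟩ := k
  rw [Prod.Lex.lt_iff]
  simp only [ofLex_toLex]
  dsimp only at hk ⊢
  omega

-- every difference vector of a strictly sorted list is lexicographically positive
theorem pvVec_pos (Xs : List (Int × Int))
    (hs : Xs.Pairwise (fun a b => toLex a < toLex b)) (k : Int × Int)
    (hk : k ∈ (pvVectorTable Xs).map Prod.fst) :
    0 < k.1 ∨ (k.1 = 0 ∧ 0 < k.2) := by
  rw [pvVectorTable_eq] at hk
  simp only [List.map_flatMap, List.mem_flatMap, List.mem_map, List.map_map,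
    PySem.List.mem_pyRange_one, Function.comp] at hk
  obtain ⟨i, ⟨h0i, hin⟩, j, ⟨hij, hjn⟩, hkeq⟩ := hk
  have hiN : i.toNat < Xs.length := by omega
  have hjN : j.toNat < Xs.length := by omega
  have hlt : i.toNat < j.toNat := by omega
  have hgi : PySem.List.pyGetD Xs i (0, 0) = Xs[i.toNat] := by
    rw [PySem.List.pyGetD_of_nonneg _ _ h0i, List.getD_eq_getElem _ _ hiN]
  have hgj : PySem.List.pyGetD Xs j (0, 0) = Xs[j.toNat] := by
    rw [PySem.List.pyGetD_of_nonneg _ _ (by omega), List.getD_eq_getElem _ _ hjN]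
  have hord := List.pairwise_iff_getElem.mp hs i.toNat j.toNat hiN hjN hlt
  rw [Prod.Lex.lt_iff] at hord
  simp only [ofLex_toLex] at hord
  subst hkeq
  rw [hgi, hgj]
  dsimp only
  rcases hord with h | ⟨h1, h2⟩
  · left; omega
  · right; omega

-- a member lex-greater than Xs[i] of a strictly sorted list lies beyond index i
theorem pvMem_drop (Xs : List (Int × Int))
    (hs : Xs.Pairwise (fun a b => toLex a < toLex b)) (i : Nat) (hi : i < Xs.length)
    (v : Int × Int) (hv : v ∈ Xs) (hlt : toLex Xs[i] < toLex v) :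
    v ∈ Xs.drop (i + 1) := by
  obtain ⟨j, hj, rfl⟩ := List.mem_iff_getElem.mp hv
  have hij : i + 1 ≤ j := by
    by_contra h
    rcases Nat.lt_or_ge j i with hlt' | hge
    · exact absurd (List.pairwise_iff_getElem.mp hs j i hj hi hlt') (by
        intro hc; exact absurd (hc.trans hlt) (lt_irrefl _))
    · have : j = i := by omega
      subst this; exact absurd hlt (lt_irrefl _)
  have hb : j - (i + 1) < (Xs.drop (i + 1)).length := by
    rw [List.length_drop]; omega
  refine List.mem_iff_getElem.mpr ⟨j - (i + 1), hb, ?_⟩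
  rw [List.getElem_drop]
  congr 1
  omega

-- THE CORE: for duplicate-free strictly sorted Xs and a realised vector k, A's pattern
-- (the origins grouped from the vector table) equals B's pattern (the translate-membership filter)
theorem pvPattern_eq (Xs : List (Int × Int)) (hnd : Xs.Nodup)
    (hs : Xs.Pairwise (fun a b => toLex a < toLex b)) (k : Int × Int)
    (hk : k ∈ (pvVectorTable Xs).map Prod.fst) :
    (((pvVectorTable Xs).filter (fun p => p.1 == k)).map (·.2)).map
        (fun i => PySem.List.pyGetD Xs i (0, 0))
      = Xs.filter (fun p => PySem.Set.contains (PySem.Set.ofList Xs) (p.1 + k.1, p.2 + k.2)) := by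
  have hpos := pvVec_pos Xs hs k hk
  rw [pvVectorTable_eq]
  rw [List.filter_flatMap, List.map_flatMap, List.map_flatMap]
  set P := fun p : Int × Int => PySem.Set.contains (PySem.Set.ofList Xs) (p.1 + k.1, p.2 + k.2)
    with hP
  conv_rhs => rw [← PySem.List.map_pyGetD_pyRange_zero' Xs (0, 0), List.filter_map,
    pvFilterMap_eq_flatMap]
  refine List.flatMap_congr (fun i hi => ?_)
  have h0i : (0 : Int) ≤ i := (PySem.List.mem_pyRange_one.mp (by simpa using hi)).1
  have hin : i < (Xs.length : Int) := (PySem.List.mem_pyRange_one.mp (by simpa using hi)).2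
  set g := fun j => PySem.List.pyGetD Xs j ((0, 0) : Int × Int) with hg
  set v : Int × Int := ((g i).1 + k.1, (g i).2 + k.2) with hv
  -- LHS of the per-i goal: a replicate of g i, one copy per matching j
  rw [List.filter_map, List.map_map, List.map_map]
  have hcnt :
      List.filter ((fun p => p.1 == k) ∘ fun j => (((g j).1 - (g i).1, (g j).2 - (g i).2), i))
          (PySem.List.pyRange (i + 1) (Xs.length : Int) 1)
        = List.filter ((fun q => q == v) ∘ g) (PySem.List.pyRange (i + 1) (Xs.length : Int) 1) := by
    refine List.filter_congr (fun j hj => ?_)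
    rw [Bool.eq_iff_iff]
    simp only [hv, Function.comp, beq_iff_eq, Prod.ext_iff]
    constructor <;> intro h <;> constructor <;> omega
  rw [hcnt]
  simp only [Function.comp_def]
  rw [List.map_const']
  have hlen : (List.filter (fun j => g j == v) (PySem.List.pyRange (i + 1) (Xs.length : Int) 1)).length
      = (Xs.drop (i + 1).toNat).count v := by
    rw [← List.countP_eq_length_filter,
        show (fun j => g j == v) = ((fun q => q == v) ∘ g) from rfl,
        ← List.countP_map, hg, PySem.List.map_pyGetD_pyRange' Xs (0, 0) (by omega)]
    rfl
  rw [hlen]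
  have hi1 : (i + 1).toNat = i.toNat + 1 := by omega
  have hgi : g i = Xs[i.toNat]'(by omega) := by
    rw [hg]
    dsimp only
    rw [PySem.List.pyGetD_of_nonneg _ _ h0i, List.getD_eq_getElem _ _ (by omega)]
  have hcontains : PySem.Set.contains (PySem.Set.ofList Xs) v = decide (v ∈ Xs) := by
    simp only [PySem.Set.contains, List.contains_eq_mem]
    simp [PySem.Set.mem_ofList]
  have hPi : P (g i) = decide (v ∈ Xs) := by
    rw [hP]; exact hcontains
  by_cases hmem : v ∈ Xs
  · have hdrop : v ∈ Xs.drop (i.toNat + 1) := by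
      refine pvMem_drop Xs hs i.toNat (by omega) v hmem ?_
      rw [← hgi, hv]; exact pvLt_add_pos (g i) k hpos
    rw [hi1, List.count_eq_one_of_mem ((List.drop_sublist _ _).nodup hnd) hdrop]
    have hcond : P (PySem.List.pyGetD Xs i (0, 0)) = true := by
      rw [show PySem.List.pyGetD Xs i (0, 0) = g i from rfl, hPi]
      simpa using hmem
    simp [hcond, hg]
  · have hzero : (Xs.drop (i + 1).toNat).count v = 0 :=
      List.count_eq_zero.mpr (fun h => hmem (List.mem_of_mem_drop h))
    rw [hzero]
    have hcond : P (g i) = false := by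
      rw [hPi]; simpa using hmem
    simp [hcond]

theorem pvSIA_eq (X : List (Int × Int)) (hnd : X.Nodup) : SIA X = SIA_alt X := by
  simp only [SIA, SIA_alt]
  rw [pvDiffs_eq]
  generalize hXs : PySem.List.sorted2 X Prod.fst Prod.snd = Xs
  have hndXs : Xs.Nodup := by
    rw [← hXs, pvSorted2_eq]
    exact ((PySem.List.sorted_perm X (fun x => toLex x) false).nodup_iff).mpr hnd
  have hsle : Xs.Pairwise (fun a b => toLex a ≤ toLex b) := by
    rw [← hXs, pvSorted2_eq]
    exact PySem.List.sorted_pairwise X (fun x => toLex x)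
  have hslt : Xs.Pairwise (fun a b => toLex a < toLex b) := by
    refine (hsle.and hndXs).imp ?_
    rintro a b ⟨hle, hne⟩
    exact lt_of_le_of_ne hle (fun h => hne (toLex.injective h))
  have hkey : (fun vi : (Int × Int) × Int => toLex (toLex vi.1, vi.2)) = pvKey3 := rfl
  rw [hkey]
  set W := pvVectorTable Xs with hWdef
  set S := PySem.List.sorted W pvKey3 with hSdef
  set dictA := S.foldl (fun d p => d.modify p.1 [] (· ++ [p.2])) PySem.Dict.empty with hA
  have hKA : dictA.keys = PySem.Set.ofList (S.map Prod.fst) := by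
    rw [hA, PySem.Dict.keys_foldl_modify_key, PySem.Dict.keys_empty, PySem.Set.update_nil_left]
  have hNA : dictA.keys.Nodup := by
    rw [hA]; exact PySem.Dict.nodup_keys_foldl_modify_key _ _ _ _ _ (by simp [PySem.Dict.keys_empty])
  have hGA : ∀ k, dictA.getD k [] = (S.filter (fun p => p.1 == k)).map (·.2) := by
    intro k
    rw [hA, PySem.Dict.getD_foldl_modify_append, PySem.Dict.getD_empty, List.nil_append]
  rw [PySem.Dict.items_eq_map_keys dictA hNA [], List.foldl_map]
  rw [hKA, ← pvKeys_eq]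
  apply PySem.List.foldl_congr_mem
  intro acc k hkmem
  have hkW : k ∈ W.map Prod.fst := by
    have := (PySem.List.mem_sorted _ _ _ _).mp hkmem
    exact (PySem.Set.mem_ofList _ _).mp this
  have hpat := pvPattern_eq Xs hndXs hslt k hkW
  rw [hGA k, hSdef, pvGroup_eq W (pvVectorTable_pairwise Xs) k]
  dsimp only
  rw [← hWdef] at hpat
  rw [← hpat]
  simp only [List.length_map]

-- ===== VERDICT (by name: the statement is the Claim_ definition above) =====
theorem SIA_spec : Claim_equal_SIA := by
  intro X _ hnd
  exact pvSIA_eq X hnd
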